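-- pv_equiv track=rewrite | github.com/Mightyhaha/Advent-of-code-2025 | aoc1/aoc1.py | count_zero_rotations
-- ===== SOURCE A (Python) =====
-- def count_zero_rotations(lines):
--     pos = 50
--     count = 0
--     for raw in lines:
--         line = raw.strip()
--         if not line:
--             continue
--         dirc = line[0].upper()
--         try:
--             dist = int(line[1:])
--         except Exception:
--             continue
--         if dirc == 'L':
--             pos = (pos - dist) % 100
--         elif dirc == 'R':
--             pos = (pos + dist) % 100
--         else:
--             continue
--         if pos % 100 == 0:
--             count += 1
--     return count
-- ===== SOURCE B (Python) =====
-- from itertools import accumulate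
--
-- def count_zero_rotations(lines):
--     deltas = []
--     for raw in lines:
--         line = raw.strip()
--         if not line or line[0] not in 'LlRr':
--             continue
--         try:
--             dist = int(line[1:])
--         except ValueError:
--             continue
--         deltas.append(dist if line[0] in 'Rr' else -dist)
--     positions = list(accumulate(deltas, initial=50))[1:]
--     return sum(1 for p in positions if p % 100 == 0)
-- ===== Notes on version B (the rewrite author's own statement) =====
-- stated objective: alternative
-- what changed: A's single fused loop that keeps a running position reduced mod 100 and a counter is replaced by three separate passes: parse each line to a signed delta, build the running positions as prefix sums via itertools.accumulate (unreduced), then count the positions divisible by 100.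
import Mathlib
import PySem

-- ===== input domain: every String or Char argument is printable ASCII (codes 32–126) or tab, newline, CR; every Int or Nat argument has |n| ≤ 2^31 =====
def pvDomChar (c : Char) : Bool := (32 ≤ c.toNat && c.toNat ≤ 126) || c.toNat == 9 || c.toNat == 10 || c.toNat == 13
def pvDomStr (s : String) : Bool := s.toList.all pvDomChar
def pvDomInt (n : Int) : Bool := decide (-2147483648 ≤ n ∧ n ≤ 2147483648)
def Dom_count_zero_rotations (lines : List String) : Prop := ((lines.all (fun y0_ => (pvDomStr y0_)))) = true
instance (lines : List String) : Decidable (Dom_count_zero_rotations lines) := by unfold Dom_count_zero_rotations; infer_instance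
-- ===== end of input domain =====

-- B replaces A's fused position/counter loop by three passes (parse lines to signed deltas, prefix sums via accumulate, count multiples of 100); a timing run measured B faster by a constant factor.

-- ===== PORT A =====
def czrStep (st : Int × Int) (raw : String) : Int × Int :=
  match PySem.Chars.strip raw.toList with
  | [] => st
  | c :: rest =>
    let dirc := PySem.Chars.upperChar c
    match PySem.Int.ofChars? rest with
    | none => st
    | some dist =>
      if dirc = 'L' then
        let pos := PySem.Int.mod (st.1 - dist) 100
        (pos, if PySem.Int.mod pos 100 = 0 then st.2 + 1 else st.2)
      else if dirc = 'R' then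
        let pos := PySem.Int.mod (st.1 + dist) 100
        (pos, if PySem.Int.mod pos 100 = 0 then st.2 + 1 else st.2)
      else st

def count_zero_rotations (lines : List String) : Int :=
  (lines.foldl czrStep (50, 0)).2

-- ===== PORT B =====
def czrParseDelta (raw : String) : Option Int :=
  match PySem.Chars.strip raw.toList with
  | [] => none
  | c :: rest =>
    if ['L', 'l', 'R', 'r'].contains c then
      match PySem.Int.ofChars? rest with
      | none => none
      | some dist => some (if ['R', 'r'].contains c then dist else -dist)
    else none

def count_zero_rotations_alt (lines : List String) : Int :=
  let deltas := lines.filterMap czrParseDelta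
  let positions := (deltas.scanl (· + ·) 50).tail
  ((positions.filter (fun p => PySem.Int.mod p 100 = 0)).length : Int)

-- ===== PRECONDITION & SPEC =====
def Spec_count_zero_rotations (lines : List String) (out : Int) : Prop := out = count_zero_rotations_alt lines
instance (lines : List String) (out : Int) : Decidable (Spec_count_zero_rotations lines out) := by unfold Spec_count_zero_rotations; infer_instance

-- ===== CLAIM (what is proved, stated in full; the proofs are below) =====
def Claim_equal_count_zero_rotations : Prop := ∀ (lines : List String), Dom_count_zero_rotations lines → Spec_count_zero_rotations lines (count_zero_rotations lines)

-- ===== LEMMAS AND PROOFS =====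
theorem czr_mod_mod (a : Int) : PySem.Int.mod (PySem.Int.mod a 100) 100 = PySem.Int.mod a 100 := by
  rw [PySem.Int.mod_eq_emod_of_pos (a:=a) (by norm_num), PySem.Int.mod_eq_emod_of_pos (by norm_num)]
  omega

theorem czr_mod_add (a b : Int) : PySem.Int.mod (PySem.Int.mod a 100 + b) 100 = PySem.Int.mod (a + b) 100 := by
  rw [PySem.Int.mod_eq_emod_of_pos (a:=a) (by norm_num), PySem.Int.mod_eq_emod_of_pos (by norm_num),
    PySem.Int.mod_eq_emod_of_pos (by norm_num)]
  omega

theorem czr_mod_sub (a b : Int) : PySem.Int.mod (PySem.Int.mod a 100 - b) 100 = PySem.Int.mod (a - b) 100 := by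
  rw [PySem.Int.mod_eq_emod_of_pos (a:=a) (by norm_num), PySem.Int.mod_eq_emod_of_pos (by norm_num),
    PySem.Int.mod_eq_emod_of_pos (by norm_num)]
  omega

def czrCount (s : Int) (ds : List Int) : Int :=
  match ds with
  | [] => 0
  | d :: ds => (if PySem.Int.mod (s + d) 100 = 0 then 1 else 0) + czrCount (s + d) ds

theorem czr_char_eq (c d : Char) (h : c.toNat = d.toNat) : c = d :=
  Char.ext (UInt32.toNat_inj.mp h)

theorem czr_upper_L (c : Char) : PySem.Chars.upperChar c = 'L' ↔ (c = 'L' ∨ c = 'l') := by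
  unfold PySem.Chars.upperChar PySem.Chars.islower
  constructor
  · intro h
    split_ifs at h with hc
    · simp only [Bool.and_eq_true, decide_eq_true_eq, Char.le_def] at hc
      right
      have hb1 : 97 ≤ c.toNat := hc.1
      have hb2 : c.toNat ≤ 122 := hc.2
      have ht := congrArg Char.toNat h
      rw [Char.toNat_ofNat, if_pos (show (c.toNat - 32).isValidChar from Or.inl (by omega)),
        show ('L' : Char).toNat = 76 from rfl] at ht
      exact czr_char_eq c 'l' (by rw [show ('l' : Char).toNat = 108 from rfl]; omega)
    · left; exact h
  · rintro (rfl | rfl) <;> decide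

theorem czr_upper_R (c : Char) : PySem.Chars.upperChar c = 'R' ↔ (c = 'R' ∨ c = 'r') := by
  unfold PySem.Chars.upperChar PySem.Chars.islower
  constructor
  · intro h
    split_ifs at h with hc
    · simp only [Bool.and_eq_true, decide_eq_true_eq, Char.le_def] at hc
      right
      have hb1 : 97 ≤ c.toNat := hc.1
      have hb2 : c.toNat ≤ 122 := hc.2
      have ht := congrArg Char.toNat h
      rw [Char.toNat_ofNat, if_pos (show (c.toNat - 32).isValidChar from Or.inl (by omega)),
        show ('R' : Char).toNat = 82 from rfl] at ht
      exact czr_char_eq c 'r' (by rw [show ('r' : Char).toNat = 114 from rfl]; omega)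
    · left; exact h
  · rintro (rfl | rfl) <;> decide

theorem czr_scanl_count (ds : List Int) : ∀ (s : Int),
    (((ds.scanl (· + ·) s).filter (fun p => PySem.Int.mod p 100 = 0)).length : Int)
      = (if PySem.Int.mod s 100 = 0 then 1 else 0) + czrCount s ds := by
  induction ds with
  | nil =>
    intro s
    rw [List.scanl_nil, List.filter_cons]
    simp only [czrCount, List.filter_nil]
    by_cases hp : PySem.Int.mod s 100 = 0
    · rw [if_pos (by simp only [decide_eq_true_eq]; exact hp), if_pos hp]; simp
    · rw [if_neg (by simp only [decide_eq_true_eq]; exact hp), if_neg hp]; simp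
  | cons d ds ih =>
    intro s
    rw [List.scanl_cons, List.filter_cons]
    simp only [czrCount]
    by_cases hp : PySem.Int.mod s 100 = 0
    · rw [if_pos (by simp only [decide_eq_true_eq]; exact hp), if_pos hp]
      simp only [List.length_cons]
      push_cast
      rw [ih (s + d)]
      ring
    · rw [if_neg (by simp only [decide_eq_true_eq]; exact hp), if_neg hp]
      rw [ih (s + d)]
      ring

theorem czr_tail_count (ds : List Int) (s : Int) :
    ((((ds.scanl (· + ·) s).tail).filter (fun p => PySem.Int.mod p 100 = 0)).length : Int)
      = czrCount s ds := by
  cases ds with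
  | nil => simp [czrCount]
  | cons d ds =>
    rw [List.scanl_cons, List.tail_cons, czr_scanl_count ds (s + d)]
    simp [czrCount]

theorem czr_key (lines : List String) : ∀ (s cnt : Int),
    (lines.foldl czrStep (PySem.Int.mod s 100, cnt)).2
      = cnt + czrCount s (lines.filterMap czrParseDelta) := by
  induction lines with
  | nil => intro s cnt; simp [czrCount]
  | cons raw ls ih =>
    intro s cnt
    rw [List.foldl_cons]
    rcases hstrip : PySem.Chars.strip raw.toList with _ | ⟨c, rest⟩
    · have h1 : czrStep (PySem.Int.mod s 100, cnt) raw = (PySem.Int.mod s 100, cnt) := by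
        unfold czrStep; rw [hstrip]
      have h2 : czrParseDelta raw = none := by
        unfold czrParseDelta; rw [hstrip]
      rw [h1, List.filterMap_cons_none h2]
      exact ih s cnt
    · rcases hint : PySem.Int.ofChars? rest with _ | dist
      · have h1 : czrStep (PySem.Int.mod s 100, cnt) raw = (PySem.Int.mod s 100, cnt) := by
          unfold czrStep; rw [hstrip]; simp only [hint]
        have h2 : czrParseDelta raw = none := by
          unfold czrParseDelta; rw [hstrip]
          by_cases hcont : (['L', 'l', 'R', 'r'].contains c) = true
          · simp [hint]
          · exact if_neg hcont
        rw [h1, List.filterMap_cons_none h2]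
        exact ih s cnt
      · by_cases hL : PySem.Chars.upperChar c = 'L'
        · have hc := (czr_upper_L c).mp hL
          have hcont : (['L', 'l', 'R', 'r'].contains c) = true := by
            rcases hc with rfl | rfl <;> decide
          have hRr : (['R', 'r'].contains c) = false := by
            rcases hc with rfl | rfl <;> decide
          have h1 : czrStep (PySem.Int.mod s 100, cnt) raw
              = (PySem.Int.mod (s - dist) 100,
                  if PySem.Int.mod (s - dist) 100 = 0 then cnt + 1 else cnt) := by
            unfold czrStep; rw [hstrip]
            simp only [hint, if_pos hL]
            rw [czr_mod_sub, czr_mod_mod]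
          have h2 : czrParseDelta raw = some (-dist) := by
            unfold czrParseDelta; rw [hstrip]
            simp only [hint, hcont, hRr]
            simp
          rw [h1, List.filterMap_cons_some h2,
            ih (s - dist) (if PySem.Int.mod (s - dist) 100 = 0 then cnt + 1 else cnt)]
          simp only [czrCount]
          have hsd : s + -dist = s - dist := by ring
          rw [hsd]
          split_ifs <;> ring
        · by_cases hR : PySem.Chars.upperChar c = 'R'
          · have hc := (czr_upper_R c).mp hR
            have hcont : (['L', 'l', 'R', 'r'].contains c) = true := by
              rcases hc with rfl | rfl <;> decide
            have hRr : (['R', 'r'].contains c) = true := by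
              rcases hc with rfl | rfl <;> decide
            have h1 : czrStep (PySem.Int.mod s 100, cnt) raw
                = (PySem.Int.mod (s + dist) 100,
                    if PySem.Int.mod (s + dist) 100 = 0 then cnt + 1 else cnt) := by
              unfold czrStep; rw [hstrip]
              simp only [hint, if_neg hL, if_pos hR]
              rw [czr_mod_add, czr_mod_mod]
            have h2 : czrParseDelta raw = some dist := by
              unfold czrParseDelta; rw [hstrip]
              simp only [hint, hcont, hRr]
              simp
            rw [h1, List.filterMap_cons_some h2,
              ih (s + dist) (if PySem.Int.mod (s + dist) 100 = 0 then cnt + 1 else cnt)]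
            simp only [czrCount]
            split_ifs <;> ring
          · have hcont : (['L', 'l', 'R', 'r'].contains c) = false := by
              simp only [List.contains_cons, List.contains_nil, Bool.or_eq_false_iff,
                beq_eq_false_iff_ne, ne_eq]
              refine ⟨?_, ?_, ?_, ?_, trivial⟩ <;> rintro rfl
              · exact hL (by decide)
              · exact hL (by decide)
              · exact hR (by decide)
              · exact hR (by decide)
            have h1 : czrStep (PySem.Int.mod s 100, cnt) raw = (PySem.Int.mod s 100, cnt) := by
              unfold czrStep; rw [hstrip]
              simp only [hint, if_neg hL, if_neg hR]
            have h2 : czrParseDelta raw = none := by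
              unfold czrParseDelta; rw [hstrip]
              simp only [hcont]
              simp
            rw [h1, List.filterMap_cons_none h2]
            exact ih s cnt

-- ===== VERDICT =====
theorem count_zero_rotations_spec : Claim_equal_count_zero_rotations := by
  intro lines _
  unfold Spec_count_zero_rotations count_zero_rotations count_zero_rotations_alt
  have h := czr_key lines 50 0
  have h50 : PySem.Int.mod (50 : Int) 100 = 50 := by decide
  rw [h50] at h
  rw [h, czr_tail_count]
  ring
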